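-- pv_equiv track=rewrite | github.com/schang1146/adventofcode2020 | 24-lobby_layout/Solution.py | runArtExhibit
-- ===== SOURCE A (Python) =====
-- def runArtExhibit(blacks, days):
--     for _ in range(days):
--         oldState = blacks.copy()
--         neighbors = {}
--         for tile in oldState:
--             tileCoords = tile[1:-1].split(',')
--             tileCoords[0] = int(tileCoords[0].strip())
--             tileCoords[1] = int(tileCoords[1].strip())
--             numBlackNeighbors = 0
--
--             coordE = [tileCoords[0] + 1, tileCoords[1]]
--             coordW = [tileCoords[0] - 1, tileCoords[1]]
--             coordNE = [tileCoords[0], tileCoords[1] + 1]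
--             coordNW = [tileCoords[0] - 1, tileCoords[1] + 1]
--             coordSE = [tileCoords[0] + 1, tileCoords[1] - 1]
--             coordSW = [tileCoords[0], tileCoords[1] - 1]
--
--             # e
--             if str(coordE) in oldState:
--                 numBlackNeighbors += 1
--             else:
--                 if str(coordE) in neighbors:
--                     neighbors[str(coordE)] += 1
--                 else:
--                     neighbors[str(coordE)] = 1
--             # w
--             if str(coordW) in oldState:
--                 numBlackNeighbors += 1
--             else:
--                 if str(coordW) in neighbors:
--                     neighbors[str(coordW)] += 1
--                 else:
--                     neighbors[str(coordW)] = 1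
--             # ne
--             if str(coordNE) in oldState:
--                 numBlackNeighbors += 1
--             else:
--                 if str(coordNE) in neighbors:
--                     neighbors[str(coordNE)] += 1
--                 else:
--                     neighbors[str(coordNE)] = 1
--             # nw
--             if str(coordNW) in oldState:
--                 numBlackNeighbors += 1
--             else:
--                 if str(coordNW) in neighbors:
--                     neighbors[str(coordNW)] += 1
--                 else:
--                     neighbors[str(coordNW)] = 1
--             # se
--             if str(coordSE) in oldState:
--                 numBlackNeighbors += 1
--             else:
--                 if str(coordSE) in neighbors:
--                     neighbors[str(coordSE)] += 1
--                 else: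
--                     neighbors[str(coordSE)] = 1
--             # sw
--             if str(coordSW) in oldState:
--                 numBlackNeighbors += 1
--             else:
--                 if str(coordSW) in neighbors:
--                     neighbors[str(coordSW)] += 1
--                 else:
--                     neighbors[str(coordSW)] = 1
--
--             if numBlackNeighbors == 0 or numBlackNeighbors > 2:
--                 blacks.remove(tile)
--
--         for tile in neighbors:
--             if neighbors[tile] == 2:
--                 blacks.add(tile)
--
--     return blacks
-- ===== SOURCE B (Python) =====
-- # Same hex-life simulation, re-decomposed: one neighbor-count dict per day (no
-- # per-tile inline membership scans, no six duplicated if/else blocks), then a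
-- # single decision pass (survive iff count in {1,2}; birth iff count == 2 and white).
-- # Mutates `blacks` in place once at the end (same final set A leaves behind).
-- def runArtExhibit(blacks, days):
--     offsets = ((1, 0), (-1, 0), (0, 1), (-1, 1), (1, -1), (0, -1))
--     cur = set(blacks)
--     for _ in range(days):
--         count = {}
--         for tile in cur:
--             coords = tile[1:-1].split(',')
--             x = int(coords[0].strip())
--             y = int(coords[1].strip())
--             for dx, dy in offsets:
--                 key = str([x + dx, y + dy])
--                 count[key] = count.get(key, 0) + 1
--         cur = {t for t in cur if count.get(t, 0) in (1, 2)} | \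
--               {k for k, c in count.items() if c == 2 and k not in cur}
--     blacks.clear()
--     blacks.update(cur)
--     return blacks
-- ===== Notes on version B (the rewrite author's own statement) =====
-- stated objective: simpler
-- what changed: Instead of six copy-pasted per-direction blocks that test each neighbour against the old set inline and keep a separate whites-only counter, B builds one count dict of black-neighbour counts for every coordinate in a single pass and then decides survivals and births in one decision pass over that dict. Pre_ admits everything when days <= 0 (the loop never runs) and otherwise requires canonical str([x, y]) tiles: unparseable tiles make A raise ValueError, and parseable non-canonical spellings (e.g. …
import Mathlib
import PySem

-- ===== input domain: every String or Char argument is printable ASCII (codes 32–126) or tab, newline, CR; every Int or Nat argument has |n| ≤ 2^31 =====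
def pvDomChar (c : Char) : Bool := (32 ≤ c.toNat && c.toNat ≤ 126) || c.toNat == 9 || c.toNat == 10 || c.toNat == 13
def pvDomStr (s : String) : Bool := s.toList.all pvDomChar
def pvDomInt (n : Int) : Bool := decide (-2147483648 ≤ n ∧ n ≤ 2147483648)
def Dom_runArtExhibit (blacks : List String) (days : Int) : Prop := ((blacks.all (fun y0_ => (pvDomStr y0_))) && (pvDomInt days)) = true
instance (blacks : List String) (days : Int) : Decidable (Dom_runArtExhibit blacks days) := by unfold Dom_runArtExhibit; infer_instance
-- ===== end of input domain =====

-- B changes the day-step decomposition (one shared neighbour-count dict + one decision pass instead of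
-- six duplicated per-direction membership blocks); equal final value, in-place mutation done once at the end.

-- ===== PORT A =====
-- Shared parsing/printing helpers: both Pythons contain the identical lines
-- `tile[1:-1].split(',')`, `int(part.strip())` and `str([x, y])`.

-- digit scanner of Python's int(): hand port (exact clone of the reference semantics:
-- digits with single '_' separators between digits; the PySem-internal helper is private).
def pyIntGo : List Char → Bool → Nat → Option Nat
  | [], afterDigit, acc => if afterDigit then some acc else none
  | c :: rest, afterDigit, acc =>
    if c.isDigit then pyIntGo rest true (acc * 10 + (c.toNat - '0'.toNat))
    else if c = '_' ∧ afterDigit = true then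
      match rest with
      | d :: _ => if d.isDigit then pyIntGo rest false acc else none
      | [] => none
    else none

-- int(s): strip int-whitespace on both ends, optional sign, digit run; none = ValueError.
-- Hand port, exact for Python's int() on ASCII arguments.
def pyInt? (s : String) : Option Int :=
  match (List.dropWhile PySem.Int.isIntSpace (List.dropWhile PySem.Int.isIntSpace s.toList).reverse).reverse with
  | [] => none
  | c :: ds =>
    if c = '-' then (pyIntGo ds false 0).map (fun a => -(a : Int))
    else if c = '+' then (pyIntGo ds false 0).map (fun a => (a : Int))
    else (pyIntGo (c :: ds) false 0).map (fun a => (a : Int))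

-- str([x, y]) : exactly Python's list-repr "[x, y]"
def strCoord (c : Int × Int) : String :=
  String.ofList ('[' :: (PySem.Int.toChars c.1 ++ ',' :: ' ' :: PySem.Int.toChars c.2 ++ [']']))

-- tileCoords = tile[1:-1].split(','); x = int(tileCoords[0].strip()); y = int(tileCoords[1].strip())
def parseTile (tile : String) : Option (Int × Int) :=
  match PySem.Str.split? (PySem.Str.slice tile (some 1) (some (-1))) "," with
  | none => none
  | some parts =>
    match PySem.List.pyGet? parts 0, PySem.List.pyGet? parts 1 with
    | some p0, some p1 =>
      match pyInt? (PySem.Str.strip p0), pyInt? (PySem.Str.strip p1) with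
      | some x, some y => some (x, y)
      | _, _ => none
    | _, _ => none

-- one of A's six identical blocks: `if str(coord) in oldState: n += 1 else: bump neighbors[str(coord)]`
def runA_visit (old : List String) (st : Int × PySem.Dict String Int) (c : Int × Int) :
    Int × PySem.Dict String Int :=
  let s := strCoord c
  if PySem.Set.contains old s then (st.1 + 1, st.2)
  else (st.1, st.2.modify s 0 (· + 1))

-- the body of A's `for tile in oldState` loop (state: the mutating set `blacks` and dict `neighbors`)
def runA_tile (old : List String) (st : List String × PySem.Dict String Int) (tile : String) :
    Option (List String × PySem.Dict String Int) :=
  match parseTile tile with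
  | none => none                        -- int() raised ValueError
  | some (x, y) =>
    let coords := [(x + 1, y), (x - 1, y), (x, y + 1), (x - 1, y + 1), (x + 1, y - 1), (x, y - 1)]
    let r := coords.foldl (runA_visit old) (0, st.2)
    let b :=
      if r.1 == 0 || decide (2 < r.1) then
        (PySem.Set.remove? st.1 tile).getD st.1   -- blacks.remove(tile); tile is always present in the set
      else st.1
    some (b, r.2)

-- one day: oldState = blacks.copy(); the tile loop; then `for tile in neighbors: if == 2: blacks.add`
def runA_day (cur : List String) : Option (List String) :=
  match cur.foldlM (runA_tile cur) (cur, PySem.Dict.empty) with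
  | none => none
  | some (b, nbrs) =>
    some (nbrs.items.foldl (fun b p => if p.2 == 2 then PySem.Set.add b p.1 else b) b)

def runArtExhibit (blacks : List String) (days : Int) : List String :=
  (((PySem.List.pyRange 0 days 1).foldl (fun acc _ => acc.bind runA_day) (some blacks))).getD blacks

-- ===== PORT B =====
def hexOffsets : List (Int × Int) := [(1, 0), (-1, 0), (0, 1), (-1, 1), (1, -1), (0, -1)]

-- count[key] = count.get(key, 0) + 1 over all six neighbours of every black tile
def runB_count (cur : List String) : Option (PySem.Dict String Int) :=
  cur.foldlM
    (fun d tile =>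
      match parseTile tile with
      | none => none
      | some (x, y) =>
        some (hexOffsets.foldl
          (fun d o =>
            let k := strCoord (x + o.1, y + o.2)
            d.insert k (d.getD k 0 + 1)) d))
    PySem.Dict.empty

-- one day of B: the count dict, then survivors and births in one decision pass
def runB_day (cur : List String) : Option (List String) :=
  match runB_count cur with
  | none => none
  | some count =>
    let keep := cur.filter (fun t => count.getD t 0 == 1 || count.getD t 0 == 2)
    let born := (count.items.filter (fun p => p.2 == 2 && !(PySem.Set.contains cur p.1))).map (·.1)
    some (keep ++ born)

def runArtExhibit_alt (blacks : List String) (days : Int) : List String :=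
  (((PySem.List.pyRange 0 days 1).foldl (fun acc _ => acc.bind runB_day)
      (some (PySem.Set.ofList blacks)))).getD (PySem.Set.ofList blacks)

-- ===== PRECONDITION & SPEC =====
-- Pre_ excludes tiles that are not in the canonical str([x, y]) spelling: on unparseable tiles A raises
-- ValueError, and on parseable non-canonical spellings (e.g. "[1,2]") A's string-keyed adjacency silently
-- misses coordinate-equal neighbours — an accident of the key format that B does not reproduce.
def isCanonTile (t : String) : Bool :=
  match parseTile t with
  | some c => strCoord c == t
  | none => false

def Pre_runArtExhibit (blacks : List String) (days : Int) : Prop :=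
  blacks.Nodup ∧ (days ≤ 0 ∨ ∀ t ∈ blacks, isCanonTile t = true)

instance (blacks : List String) (days : Int) : Decidable (Pre_runArtExhibit blacks days) := by
  unfold Pre_runArtExhibit; infer_instance

def pvWitness_runArtExhibit : List String × Int := (["[0, 0]", "[1, 0]"], 2)

def Spec_runArtExhibit (blacks : List String) (days : Int) (out : List String) : Prop :=
  out = runArtExhibit_alt blacks days
instance (blacks : List String) (days : Int) (out : List String) :
    Decidable (Spec_runArtExhibit blacks days out) := by unfold Spec_runArtExhibit; infer_instance

-- ===== CLAIM (what is proved, stated in full; the proofs are below) =====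
def Claim_equal_runArtExhibit : Prop :=
  ∀ (blacks : List String) (days : Int), Dom_runArtExhibit blacks days →
    Pre_runArtExhibit blacks days → Spec_runArtExhibit blacks days (runArtExhibit blacks days)

-- ===== LEMMAS AND PROOFS =====

-- ---------- digits ----------
def myDigits (n : Nat) : List Char :=
  if n < 10 then [Nat.digitChar n] else myDigits (n / 10) ++ [Nat.digitChar (n % 10)]
  termination_by n
  decreasing_by omega

theorem toDigitsCore_eq (n : Nat) : ∀ (fuel : Nat) (acc : List Char), n < fuel →
    Nat.toDigitsCore 10 fuel n acc = myDigits n ++ acc := by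
  induction n using Nat.strong_induction_on with
  | _ n ih =>
    intro fuel acc hfuel
    match fuel, hfuel with
    | fuel + 1, _ =>
      rw [Nat.toDigitsCore]
      by_cases h10 : n < 10
      · have : n / 10 = 0 := by omega
        simp only [this]
        rw [myDigits]
        have : n % 10 = n := by omega
        simp [h10, this]
      · have hne : ¬ n / 10 = 0 := by omega
        simp only [hne, ite_false]
        rw [ih (n / 10) (by omega) fuel (Nat.digitChar (n % 10) :: acc) (by omega),
          show myDigits n = myDigits (n / 10) ++ [Nat.digitChar (n % 10)] from by
            conv_lhs => rw [myDigits]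
            simp [h10]]
        simp

theorem toDigits_eq_myDigits (n : Nat) : Nat.toDigits 10 n = myDigits n := by
  rw [Nat.toDigits, toDigitsCore_eq n (n+1) [] (by omega)]; simp

theorem digitChar_isDigit {m : Nat} (h : m < 10) : (Nat.digitChar m).isDigit = true := by
  interval_cases m <;> decide

theorem digitChar_val {m : Nat} (h : m < 10) : (Nat.digitChar m).toNat - '0'.toNat = m := by
  interval_cases m <;> decide

theorem myDigits_all_digit (n : Nat) : ∀ c ∈ myDigits n, c.isDigit = true := by
  induction n using Nat.strong_induction_on with
  | _ n ih =>
    rw [myDigits]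
    by_cases h10 : n < 10
    · simp only [if_pos h10, List.mem_singleton]
      rintro c rfl; exact digitChar_isDigit h10
    · simp only [if_neg h10, List.mem_append, List.mem_singleton]
      rintro c (hc | rfl)
      · exact ih (n / 10) (by omega) c hc
      · exact digitChar_isDigit (by omega)

theorem myDigits_ne_nil (n : Nat) : myDigits n ≠ [] := by
  rw [myDigits]; split <;> simp

theorem myDigits_foldl (n : Nat) : ∀ acc : Nat,
    (myDigits n).foldl (fun a c => a * 10 + (c.toNat - '0'.toNat)) acc
      = acc * 10 ^ (myDigits n).length + n := by
  induction n using Nat.strong_induction_on with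
  | _ n ih =>
    intro acc
    by_cases h10 : n < 10
    · have hD : myDigits n = [Nat.digitChar n] := by rw [myDigits]; simp [h10]
      rw [hD]
      simp only [List.foldl_cons, List.foldl_nil, List.length_cons, List.length_nil,
        Nat.zero_add, pow_one, digitChar_val h10]
    · have hD : myDigits n = myDigits (n / 10) ++ [Nat.digitChar (n % 10)] := by
        conv_lhs => rw [myDigits]
        simp [h10]
      rw [hD, List.foldl_append, ih (n / 10) (by omega)]
      have h1 : n % 10 < 10 := by omega
      simp only [List.foldl_cons, List.foldl_nil, digitChar_val h1, List.length_append,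
        List.length_cons, List.length_nil, Nat.zero_add]
      have h2 : acc * 10 ^ ((myDigits (n / 10)).length + 1) =
          acc * 10 ^ (myDigits (n / 10)).length * 10 := by ring
      rw [h2]
      omega

theorem pyIntGo_digits (ds : List Char) (h : ∀ c ∈ ds, c.isDigit = true) : ∀ acc : Nat,
    pyIntGo ds true acc = some (ds.foldl (fun a c => a * 10 + (c.toNat - '0'.toNat)) acc) := by
  induction ds with
  | nil => intro acc; simp [pyIntGo]
  | cons c rest ih =>
    intro acc
    have hc : c.isDigit = true := h c (by simp)
    rw [show pyIntGo (c :: rest) true acc = pyIntGo rest true (acc * 10 + (c.toNat - '0'.toNat))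
        from by simp [pyIntGo, hc],
      ih (fun d hd => h d (by simp [hd]))]
    simp

theorem pyIntGo_digits' (ds : List Char) (hne : ds ≠ []) (h : ∀ c ∈ ds, c.isDigit = true)
    (acc : Nat) :
    pyIntGo ds false acc = some (ds.foldl (fun a c => a * 10 + (c.toNat - '0'.toNat)) acc) := by
  match ds, hne with
  | c :: rest, _ =>
    have hc : c.isDigit = true := h c (by simp)
    rw [show pyIntGo (c :: rest) false acc = pyIntGo rest true (acc * 10 + (c.toNat - '0'.toNat))
        from by simp [pyIntGo, hc],
      pyIntGo_digits rest (fun d hd => h d (by simp [hd]))]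
    simp

-- ---------- characters of toChars ----------
theorem char_ne_of_toNat_ne {a b : Char} (h : a.toNat ≠ b.toNat) : a ≠ b := by
  intro hEq; exact h (by rw [hEq])

theorem isDigit_toNat {c : Char} (h : c.isDigit = true) : 48 ≤ c.toNat ∧ c.toNat ≤ 57 := by
  simp only [Char.isDigit, Bool.and_eq_true, decide_eq_true_eq] at h
  exact ⟨h.1, h.2⟩

theorem isDigit_facts {c : Char} (h : c.isDigit = true) :
    PySem.Int.isIntSpace c = false ∧ PySem.Chars.isspace c = false ∧ c ≠ ',' ∧ c ≠ '-' ∧ c ≠ '+'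
      ∧ c ≠ '[' ∧ c ≠ ']' := by
  obtain ⟨h1, h2⟩ := isDigit_toNat h
  refine ⟨?_, ?_, ?_, ?_, ?_, ?_, ?_⟩
  · simp only [PySem.Int.isIntSpace, Bool.or_eq_false_iff, decide_eq_false_iff_not]
    refine ⟨⟨⟨⟨⟨?_, ?_⟩, ?_⟩, ?_⟩, ?_⟩, ?_⟩ <;>
      · intro hEq; subst hEq; simp_all
  · simp only [PySem.Chars.isspace, Bool.or_eq_false_iff, Bool.and_eq_false_iff,
      decide_eq_false_iff_not]
    omega
  · exact char_ne_of_toNat_ne (by rw [show ','.toNat = 44 from rfl]; omega)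
  · exact char_ne_of_toNat_ne (by rw [show '-'.toNat = 45 from rfl]; omega)
  · exact char_ne_of_toNat_ne (by rw [show '+'.toNat = 43 from rfl]; omega)
  · exact char_ne_of_toNat_ne (by rw [show '['.toNat = 91 from rfl]; omega)
  · exact char_ne_of_toNat_ne (by rw [show ']'.toNat = 93 from rfl]; omega)

theorem toChars_eq (n : Int) :
    PySem.Int.toChars n = if n < 0 then '-' :: myDigits n.natAbs else myDigits n.toNat := by
  rw [PySem.Int.toChars]
  split <;> rw [toDigits_eq_myDigits]

theorem dash_facts :
    PySem.Int.isIntSpace '-' = false ∧ PySem.Chars.isspace '-' = false ∧ '-' ≠ ',' ∧ '-' ≠ '['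
      ∧ '-' ≠ ']' := by decide

theorem toChars_clean (n : Int) : ∀ c ∈ PySem.Int.toChars n,
    PySem.Int.isIntSpace c = false ∧ PySem.Chars.isspace c = false ∧ c ≠ ',' ∧ c ≠ '[' ∧ c ≠ ']' := by
  intro c hc
  rw [toChars_eq] at hc
  split at hc
  · rcases List.mem_cons.mp hc with rfl | hc
    · exact ⟨dash_facts.1, dash_facts.2.1, dash_facts.2.2.1, dash_facts.2.2.2.1, dash_facts.2.2.2.2⟩
    · have := isDigit_facts (myDigits_all_digit _ c hc)
      exact ⟨this.1, this.2.1, this.2.2.1, this.2.2.2.2.2.1, this.2.2.2.2.2.2⟩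
  · have := isDigit_facts (myDigits_all_digit _ c hc)
    exact ⟨this.1, this.2.1, this.2.2.1, this.2.2.2.2.2.1, this.2.2.2.2.2.2⟩

-- ---------- int(str(n)) ----------
theorem dropWhile_eq_self_of_all {α : Type} (p : α → Bool) (l : List α)
    (h : ∀ c ∈ l, p c = false) : l.dropWhile p = l := by
  cases l with
  | nil => rfl
  | cons x xs => rw [List.dropWhile_cons, h x (by simp)]; simp

theorem pyInt?_toChars (n : Int) : pyInt? (String.ofList (PySem.Int.toChars n)) = some n := by
  have hclean := toChars_clean n
  have hstrip : (List.dropWhile PySem.Int.isIntSpace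
      (List.dropWhile PySem.Int.isIntSpace (PySem.Int.toChars n)).reverse).reverse
      = PySem.Int.toChars n := by
    rw [dropWhile_eq_self_of_all _ _ (fun c hc => (hclean c hc).1),
      dropWhile_eq_self_of_all _ _ (fun c hc => (hclean c (List.mem_reverse.mp hc)).1),
      List.reverse_reverse]
  rw [pyInt?, String.toList_ofList, hstrip]
  by_cases hneg : n < 0
  · rw [toChars_eq, if_pos hneg]
    simp only [reduceIte]
    rw [pyIntGo_digits' (myDigits n.natAbs) (myDigits_ne_nil _) (myDigits_all_digit _),
      myDigits_foldl]
    exact congrArg some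
      (show -(((0 * 10 ^ (myDigits n.natAbs).length + n.natAbs : Nat) : Int)) = n by omega)
  · rw [toChars_eq, if_neg hneg]
    cases hE : myDigits n.toNat with
    | nil => exact absurd hE (myDigits_ne_nil _)
    | cons d tail =>
      have hd : d.isDigit = true := myDigits_all_digit _ d (by rw [hE]; simp)
      have hfacts := isDigit_facts hd
      simp only [if_neg hfacts.2.2.2.1, if_neg hfacts.2.2.2.2.1]
      rw [← hE, pyIntGo_digits' _ (myDigits_ne_nil _) (myDigits_all_digit _), myDigits_foldl]
      exact congrArg some
        (show (((0 * 10 ^ (myDigits n.toNat).length + n.toNat : Nat) : Int)) = n by omega)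

-- ---------- slicing, splitting, stripping ----------
theorem slice_bracket (mid : List Char) :
    PySem.List.slice ('[' :: mid ++ [']']) (some 1) (some (-1)) = mid := by
  have hlen : ('[' :: (mid ++ [']'])).length = mid.length + 2 := by simp
  simp only [PySem.List.slice, PySem.List.clampIdx]
  norm_num
  rw [if_neg (by omega)]
  simpa using List.take_left (l₁ := mid) (l₂ := [']'])

theorem splitOn_go_A (l : List Char) (h : ',' ∉ l) : ∀ (fuel : Nat), l.length < fuel →
    ∀ (cur : List Char) (acc : List (List Char)),
    PySem.Chars.splitOn.go [','] fuel l cur acc = acc.reverse ++ [cur.reverse ++ l] := by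
  induction l with
  | nil =>
    intro fuel hf cur acc
    cases fuel with
    | zero => simp at hf
    | succ fuel => rw [PySem.Chars.splitOn.go]; simp; omega
  | cons c rest ih =>
    intro fuel hf cur acc
    cases fuel with
    | zero => simp at hf
    | succ fuel =>
      rw [PySem.Chars.splitOn.go]
      have hc : ¬ (c = ',') := fun hEq => h (by simp [hEq])
      have hpre : [','].isPrefixOf (c :: rest) = false := by
        simp [List.isPrefixOf]; exact fun hEq => hc hEq.symm
      rw [hpre]
      simp only [Bool.false_eq_true, if_false]
      rw [ih (fun hm => h (by simp [hm])) fuel (by simpa using hf) (c :: cur) acc]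
      simp

theorem splitOn_go_full (d2 : List Char) (h2 : ',' ∉ d2) :
    ∀ (d1 : List Char), ',' ∉ d1 → ∀ (fuel : Nat), d1.length + d2.length + 2 ≤ fuel →
    ∀ (cur : List Char) (acc : List (List Char)),
    PySem.Chars.splitOn.go [','] fuel (d1 ++ ',' :: d2) cur acc
      = acc.reverse ++ [cur.reverse ++ d1, d2] := by
  intro d1
  induction d1 with
  | nil =>
    intro _ fuel hf cur acc
    cases fuel with
    | zero => simp at hf
    | succ fuel =>
      simp only [List.nil_append]
      rw [PySem.Chars.splitOn.go]
      have hpre : [','].isPrefixOf (',' :: d2) = true := by simp [List.isPrefixOf]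
      rw [hpre]
      simp only [if_true, List.length_cons, List.length_nil, List.drop_succ_cons,
        List.drop_zero]
      rw [splitOn_go_A d2 h2 fuel (by simp at hf ⊢; omega) [] (cur.reverse :: acc)]
      simp
  | cons c rest ih =>
    intro h1 fuel hf cur acc
    cases fuel with
    | zero => simp at hf
    | succ fuel =>
      simp only [List.cons_append]
      rw [PySem.Chars.splitOn.go]
      have hc : ¬ (c = ',') := fun hEq => h1 (by simp [hEq])
      have hpre : [','].isPrefixOf (c :: (rest ++ ',' :: d2)) = false := by
        simp [List.isPrefixOf]; exact fun hEq => hc hEq.symm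
      rw [hpre]
      simp only [Bool.false_eq_true, if_false]
      rw [ih (fun hm => h1 (by simp [hm])) fuel (by simp at hf ⊢; omega) (c :: cur) acc]
      simp

theorem splitOn_comma (d1 d2 : List Char) (h1 : ',' ∉ d1) (h2 : ',' ∉ d2) :
    PySem.Chars.splitOn (d1 ++ ',' :: d2) [','] = [d1, d2] := by
  rw [PySem.Chars.splitOn,
    splitOn_go_full d2 h2 d1 h1 ((d1 ++ ',' :: d2).length + 1) (by simp) [] []]
  simp

theorem strip_no_space (l : List Char) (h : ∀ c ∈ l, PySem.Chars.isspace c = false) :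
    PySem.Chars.strip l = l := by
  rw [PySem.Chars.strip, PySem.Chars.lstrip, dropWhile_eq_self_of_all _ _ h,
    PySem.Chars.rstrip, dropWhile_eq_self_of_all _ _ (fun c hc => h c (List.mem_reverse.mp hc)),
    List.reverse_reverse]

-- ---------- the roundtrip ----------
theorem parseTile_strCoord (c : Int × Int) : parseTile (strCoord c) = some c := by
  obtain ⟨x, y⟩ := c
  have hx := toChars_clean x
  have hy := toChars_clean y
  have hxc : ',' ∉ PySem.Int.toChars x := fun hm => ((hx ',' hm).2.2.1) rfl
  have hyc : ',' ∉ (' ' :: PySem.Int.toChars y) := by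
    intro hm
    rcases List.mem_cons.mp hm with h | h
    · exact absurd h.symm (by decide)
    · exact ((hy ',' h).2.2.1) rfl
  have hslice : PySem.Str.slice (strCoord (x, y)) (some 1) (some (-1))
      = String.ofList (PySem.Int.toChars x ++ ',' :: ' ' :: PySem.Int.toChars y) := by
    rw [PySem.Str.slice]
    congr 1
    rw [strCoord, String.toList_ofList, PySem.Chars.slice]
    rw [show ('[' : Char) :: (PySem.Int.toChars x ++ ',' :: ' ' :: PySem.Int.toChars y ++ [']'])
        = '[' :: ((PySem.Int.toChars x ++ ',' :: ' ' :: PySem.Int.toChars y) ++ [']']) from by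
      simp]
    exact slice_bracket _
  have hsplit : PySem.Str.split?
      (String.ofList (PySem.Int.toChars x ++ ',' :: ' ' :: PySem.Int.toChars y)) ","
      = some [String.ofList (PySem.Int.toChars x), String.ofList (' ' :: PySem.Int.toChars y)] := by
    rw [PySem.Str.split?, String.toList_ofList, show (",".toList) = [','] from rfl,
      PySem.Chars.split?]
    rw [if_neg (by simp)]
    rw [splitOn_comma _ _ hxc hyc]
    simp
  have hstrip0 : PySem.Str.strip (String.ofList (PySem.Int.toChars x))
      = String.ofList (PySem.Int.toChars x) := by
    rw [PySem.Str.strip, String.toList_ofList, strip_no_space _ (fun c hc => (hx c hc).2.1)]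
  have hstrip1 : PySem.Str.strip (String.ofList (' ' :: PySem.Int.toChars y))
      = String.ofList (PySem.Int.toChars y) := by
    rw [PySem.Str.strip, String.toList_ofList, PySem.Chars.strip, PySem.Chars.lstrip,
      List.dropWhile_cons, show PySem.Chars.isspace ' ' = true from rfl]
    rw [if_pos rfl, dropWhile_eq_self_of_all _ _ (fun c hc => (hy c hc).2.1),
      PySem.Chars.rstrip,
      dropWhile_eq_self_of_all _ _ (fun c hc => (hy c (List.mem_reverse.mp hc)).2.1),
      List.reverse_reverse]
  rw [parseTile, hslice, hsplit]
  simp only [PySem.List.pyGet?_zero_cons,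
    show ∀ (a b : String), PySem.List.pyGet? [a, b] 1 = some b from fun a b => rfl]
  rw [hstrip0, hstrip1, pyInt?_toChars, pyInt?_toChars]

theorem strCoord_eq_iff (a b : Int × Int) : strCoord a = strCoord b ↔ a = b := by
  constructor
  · intro h
    have := parseTile_strCoord a
    rw [h, parseTile_strCoord b] at this
    exact (Option.some_inj.mp this).symm
  · rintro rfl; rfl

theorem isCanonTile_strCoord (c : Int × Int) : isCanonTile (strCoord c) = true := by
  rw [isCanonTile, parseTile_strCoord]
  simp

-- ---------- abstraction of the per-day computation ----------
def coordOf (t : String) : Int × Int := (parseTile t).getD (0, 0)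

def nbrsOf (c : Int × Int) : List String :=
  [strCoord (c.1 + 1, c.2), strCoord (c.1 - 1, c.2), strCoord (c.1, c.2 + 1),
   strCoord (c.1 - 1, c.2 + 1), strCoord (c.1 + 1, c.2 - 1), strCoord (c.1, c.2 - 1)]

def seqOf (cur : List String) : List String := cur.flatMap (fun t => nbrsOf (coordOf t))

def cntA (old : List String) (t : String) : Int :=
  ((nbrsOf (coordOf t)).countP (fun s => PySem.Set.contains old s) : Int)

def aRemove (old : List String) (b : List String) (t : String) : List String :=
  if cntA old t == 0 || decide (2 < cntA old t) then (PySem.Set.remove? b t).getD b else b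

theorem canon_iff {t : String} (h : isCanonTile t = true) :
    parseTile t = some (coordOf t) ∧ strCoord (coordOf t) = t := by
  rw [isCanonTile] at h
  cases hp : parseTile t with
  | none => rw [hp] at h; simp at h
  | some c =>
    rw [hp] at h
    simp only [beq_iff_eq] at h
    rw [coordOf, hp]
    exact ⟨rfl, h⟩

theorem nbrsOf_nodup (c : Int × Int) : (nbrsOf c).Nodup := by
  simp only [nbrsOf, List.nodup_cons, List.mem_cons, List.not_mem_nil,
    List.nodup_nil, strCoord_eq_iff, Prod.mk.injEq, not_or, and_true, not_false_eq_true]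
  omega

theorem nbrsOf_symm (a b : Int × Int) : strCoord b ∈ nbrsOf a ↔ strCoord a ∈ nbrsOf b := by
  simp only [nbrsOf, List.mem_cons, List.not_mem_nil, or_false,
    strCoord_eq_iff, Prod.ext_iff]
  omega

-- ---------- port A reduced ----------
theorem visit_fold (old : List String) : ∀ (l : List (Int × Int)) (st : Int × PySem.Dict String Int),
    l.foldl (runA_visit old) st
      = (st.1 + ((l.map strCoord).countP (fun s => PySem.Set.contains old s) : Int),
         ((l.map strCoord).filter (fun s => !PySem.Set.contains old s)).foldl
           (fun dd s => dd.modify s 0 (· + 1)) st.2) := by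
  intro l
  induction l with
  | nil => intro st; simp
  | cons c' rest ih =>
    intro st
    rw [List.foldl_cons, ih]
    by_cases hcon : PySem.Set.contains old (strCoord c') = true
    · rw [show runA_visit old st c' = (st.1 + 1, st.2) from by
        rw [runA_visit]; simp only [hcon, if_true]]
      simp only [List.map_cons, List.countP_cons, List.filter_cons, hcon, Bool.not_true,
        Bool.false_eq_true, if_false, if_true, Prod.mk.injEq]
      refine ⟨by push_cast; ring, by trivial⟩
    · rw [show runA_visit old st c'
          = (st.1, st.2.modify (strCoord c') 0 (· + 1)) from by
        rw [runA_visit]; simp only [hcon, Bool.false_eq_true, if_false]]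
      simp only [List.map_cons, List.countP_cons, List.filter_cons, hcon, Bool.not_false,
        Bool.false_eq_true, if_false, if_true, Prod.mk.injEq]
      refine ⟨by push_cast; ring, by trivial⟩

theorem runA_tile_eq (old b : List String) (d : PySem.Dict String Int) (t : String)
    (h : isCanonTile t = true) :
    runA_tile old (b, d) t = some (aRemove old b t,
      ((nbrsOf (coordOf t)).filter (fun s => !PySem.Set.contains old s)).foldl
        (fun d s => d.modify s 0 (· + 1)) d) := by
  obtain ⟨hp, _⟩ := canon_iff h
  rcases hco : coordOf t with ⟨x, y⟩
  rw [hco] at hp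
  have hmap : nbrsOf (x, y)
      = [(x + 1, y), (x - 1, y), (x, y + 1), (x - 1, y + 1), (x + 1, y - 1), (x, y - 1)].map
          strCoord := by simp [nbrsOf]
  rw [runA_tile, hp]
  simp only [visit_fold]
  rw [aRemove, cntA, hco, hmap]
  simp only [Int.zero_add]

theorem runA_fold_eq (old : List String) : ∀ (l : List String) (b : List String)
    (d : PySem.Dict String Int), (∀ t ∈ l, isCanonTile t = true) →
    l.foldlM (runA_tile old) (b, d) = some (l.foldl (aRemove old) b,
      ((l.flatMap (fun t => (nbrsOf (coordOf t)).filter (fun s => !PySem.Set.contains old s))).foldl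
        (fun d s => d.modify s 0 (· + 1)) d)) := by
  intro l
  induction l with
  | nil => intro b d _; simp
  | cons t l ih =>
    intro b d h
    rw [List.foldlM_cons, runA_tile_eq old b d t (h t (by simp))]
    simp only [Option.bind_eq_bind, Option.bind]
    rw [ih _ _ (fun u hu => h u (by simp [hu]))]
    simp [List.foldl_append]

theorem remove_fold (p : String → Bool) : ∀ (l pre : List String), (pre ++ l).Nodup →
    l.foldl (fun b t => if p t then (PySem.Set.remove? b t).getD b else b) (pre ++ l)
      = pre ++ l.filter (fun t => !p t) := by
  intro l
  induction l with
  | nil => intro pre _; simp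
  | cons t l ih =>
    intro pre hnd
    obtain ⟨hpre, htl, hdisj⟩ := List.nodup_append.mp hnd
    have htpre : t ∉ pre := fun ht => hdisj t ht t (by simp) rfl
    have htl' : t ∉ l := (List.nodup_cons.mp htl).1
    rw [List.foldl_cons]
    by_cases hpt : p t = true
    · rw [if_pos hpt]
      have hmem : t ∈ pre ++ t :: l := by simp
      rw [PySem.Set.remove?_of_mem hmem]
      have hdiscard : PySem.Set.discard (pre ++ t :: l) t = pre ++ l := by
        rw [PySem.Set.discard, List.filter_append]
        rw [List.filter_eq_self.mpr (fun a ha => by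
          simp only [Bool.not_eq_true', beq_eq_false_iff_ne, ne_eq]
          exact fun hEq => htpre (hEq ▸ ha))]
        congr 1
        rw [List.filter_cons]
        simp only [beq_self_eq_true, Bool.not_true, Bool.false_eq_true, if_false]
        exact List.filter_eq_self.mpr (fun a ha => by
          simp only [Bool.not_eq_true', beq_eq_false_iff_ne, ne_eq]
          exact fun hEq => htl' (hEq ▸ ha))
      rw [Option.getD_some, hdiscard,
        ih pre (by
          refine List.nodup_append.mpr ⟨hpre, (List.nodup_cons.mp htl).2, ?_⟩
          exact fun a ha b hb => hdisj a ha b (by simp [hb]))]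
      rw [List.filter_cons]
      simp [hpt]
    · rw [if_neg hpt]
      have hassoc : pre ++ t :: l = (pre ++ [t]) ++ l := by simp
      rw [hassoc, ih (pre ++ [t]) (by rw [← hassoc]; exact hnd)]
      rw [List.filter_cons]
      simp [hpt]

theorem add_fold (q : String → Bool) : ∀ (ks b : List String), ks.Nodup → (∀ k ∈ ks, k ∉ b) →
    ks.foldl (fun b k => if q k then PySem.Set.add b k else b) b = b ++ ks.filter q := by
  intro ks
  induction ks with
  | nil => intro b _ _; simp
  | cons k ks ih =>
    intro b hnd hfresh
    obtain ⟨hk, hks⟩ := List.nodup_cons.mp hnd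
    rw [List.foldl_cons, List.filter_cons]
    by_cases hq : q k = true
    · rw [if_pos hq]
      have hnotb : k ∉ b := hfresh k (by simp)
      have hadd : PySem.Set.add b k = b ++ [k] := by
        rw [PySem.Set.add, if_neg (by
          simp only [PySem.Set.contains]
          exact fun hc => hnotb (List.contains_iff_mem.mp hc))]
      rw [hadd, ih (b ++ [k]) hks (fun u hu => by
        simp only [List.mem_append, List.mem_singleton, not_or]
        exact ⟨fun hub => hfresh u (by simp [hu]) hub, fun hEq => hk (hEq ▸ hu)⟩)]
      simp [hq]
    · rw [if_neg hq]
      rw [ih b hks (fun u hu => hfresh u (by simp [hu]))]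
      simp [hq]

-- ---------- port B reduced ----------
theorem runB_fold_eq : ∀ (cur : List String), (∀ t ∈ cur, isCanonTile t = true) →
    ∀ (d : PySem.Dict String Int),
    cur.foldlM
      (fun d tile =>
        match parseTile tile with
        | none => none
        | some (x, y) =>
          some (hexOffsets.foldl
            (fun d o =>
              let k := strCoord (x + o.1, y + o.2)
              d.insert k (d.getD k 0 + 1)) d))
      d = some ((seqOf cur).foldl (fun d k => d.insert k (d.getD k 0 + 1)) d) := by
  intro cur
  induction cur with
  | nil => intro _ d; simp [seqOf]
  | cons t l ih =>
    intro h d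
    obtain ⟨hp, _⟩ := canon_iff (h t (by simp))
    rcases hco : coordOf t with ⟨x, y⟩
    rw [hco] at hp
    rw [List.foldlM_cons, hp]
    have hinner : hexOffsets.foldl
        (fun d o =>
          let k := strCoord (x + o.1, y + o.2)
          d.insert k (d.getD k 0 + 1)) d
        = (nbrsOf (x, y)).foldl (fun d k => d.insert k (d.getD k 0 + 1)) d := by
      simp [hexOffsets, nbrsOf, ← sub_eq_add_neg]
    simp only [Option.bind_eq_bind, Option.bind]
    rw [ih (fun u hu => h u (by simp [hu]))]
    rw [hinner, show seqOf (t :: l) = nbrsOf (coordOf t) ++ seqOf l from by simp [seqOf], hco,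
      List.foldl_append]

theorem runB_count_eq (cur : List String) (h : ∀ t ∈ cur, isCanonTile t = true) :
    runB_count cur = some (PySem.Dict.counter (seqOf cur)) := by
  rw [runB_count, runB_fold_eq cur h PySem.Dict.empty,
    PySem.Dict.foldl_insert_getD_add_one_eq_counter]

-- ---------- counting core ----------
theorem countP_exchange (l m : List String) (hl : l.Nodup) (hm : m.Nodup) :
    l.countP (fun x => decide (x ∈ m)) = m.countP (fun x => decide (x ∈ l)) := by
  rw [List.countP_eq_length_filter, List.countP_eq_length_filter]
  refine List.Perm.length_eq ?_
  refine (List.perm_ext_iff_of_nodup (hl.filter _) (hm.filter _)).mpr (fun a => ?_)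
  simp only [List.mem_filter, decide_eq_true_eq]
  exact ⟨fun ⟨h1, h2⟩ => ⟨h2, h1⟩, fun ⟨h1, h2⟩ => ⟨h2, h1⟩⟩

theorem sum_map_indicator (l : List String) (f : String → Nat) (p : String → Bool)
    (h : ∀ u ∈ l, f u = if p u then 1 else 0) : (l.map f).sum = l.countP p := by
  induction l with
  | nil => simp
  | cons u l ih =>
    rw [List.map_cons, List.sum_cons, List.countP_cons, ih (fun v hv => h v (by simp [hv])),
      h u (by simp)]
    by_cases hp : p u = true <;> simp [hp] <;> omega

theorem seq_count (cur : List String) (hnd : cur.Nodup)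
    (hc : ∀ t ∈ cur, isCanonTile t = true) (t : String) (ht : t ∈ cur) :
    (seqOf cur).count t = (nbrsOf (coordOf t)).countP (fun s => PySem.Set.contains cur s) := by
  rw [seqOf, List.count_flatMap]
  rw [sum_map_indicator cur _ (fun u => decide (t ∈ nbrsOf (coordOf u))) (fun u _ => by
    by_cases hm : t ∈ nbrsOf (coordOf u)
    · simp only [hm, decide_true, if_true, Function.comp_apply]
      exact List.count_eq_one_of_mem (nbrsOf_nodup _) hm
    · simp only [hm, decide_false, Function.comp_apply]
      exact List.count_eq_zero_of_not_mem hm)]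
  rw [List.countP_congr (q := fun u => decide (u ∈ nbrsOf (coordOf t))) (fun u hu => by
    have hut := canon_iff (hc u hu)
    have htt := canon_iff (hc t ht)
    have h1 := nbrsOf_symm (coordOf u) (coordOf t)
    rw [htt.2, hut.2] at h1
    simp only [decide_eq_true_eq]
    exact h1)]
  rw [countP_exchange cur (nbrsOf (coordOf t)) hnd (nbrsOf_nodup _)]
  exact List.countP_congr (fun s _ => by
    simp [PySem.Set.contains])

theorem add_filter (q : String → Bool) (acc : List String) (x : String) (hq : q x = true) :
    PySem.Set.add (acc.filter q) x = (PySem.Set.add acc x).filter q := by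
  by_cases hx : x ∈ acc
  · rw [show PySem.Set.add acc x = acc from by
      rw [PySem.Set.add, if_pos (by
        simp only [PySem.Set.contains]; exact List.contains_iff_mem.mpr hx)]]
    rw [PySem.Set.add, if_pos (by
      simp only [PySem.Set.contains]
      exact List.contains_iff_mem.mpr (List.mem_filter.mpr ⟨hx, hq⟩))]
  · rw [show PySem.Set.add acc x = acc ++ [x] from by
      rw [PySem.Set.add, if_neg (by
        simp only [PySem.Set.contains]
        exact fun hc => hx (List.contains_iff_mem.mp hc))]]
    rw [PySem.Set.add, if_neg (by
      simp only [PySem.Set.contains]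
      exact fun hc => hx (List.mem_filter.mp (List.contains_iff_mem.mp hc)).1)]
    rw [List.filter_append]
    simp [hq]

theorem add_filter_neg (q : String → Bool) (acc : List String) (x : String) (hq : q x = false) :
    (PySem.Set.add acc x).filter q = acc.filter q := by
  by_cases hx : x ∈ acc
  · rw [show PySem.Set.add acc x = acc from by
      rw [PySem.Set.add, if_pos (by
        simp only [PySem.Set.contains]; exact List.contains_iff_mem.mpr hx)]]
  · rw [show PySem.Set.add acc x = acc ++ [x] from by
      rw [PySem.Set.add, if_neg (by
        simp only [PySem.Set.contains]
        exact fun hc => hx (List.contains_iff_mem.mp hc))]]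
    rw [List.filter_append]
    simp [hq]

theorem ofList_filter_fold (q : String → Bool) : ∀ (l acc : List String),
    (l.filter q).foldl PySem.Set.add (acc.filter q) = (l.foldl PySem.Set.add acc).filter q := by
  intro l
  induction l with
  | nil => intro acc; simp
  | cons x l ih =>
    intro acc
    rw [List.filter_cons]
    by_cases hq : q x = true
    · rw [if_pos hq, List.foldl_cons, List.foldl_cons, add_filter q acc x hq, ih]
    · rw [if_neg (by simp [hq]), List.foldl_cons, ← add_filter_neg q acc x (by simpa using hq), ih]

theorem ofList_filter (q : String → Bool) (l : List String) :
    PySem.Set.ofList (l.filter q) = (PySem.Set.ofList l).filter q := by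
  rw [PySem.Set.ofList_eq_foldl, PySem.Set.ofList_eq_foldl,
    ← ofList_filter_fold q l []]
  rfl

-- ---------- the day step ----------
theorem survive_bool (c : Nat) :
    (((c : Int) == 1) || ((c : Int) == 2))
      = (!(((c : Int) == 0) || decide (2 < (c : Int)))) := by
  by_cases h0 : c = 0
  · subst h0; decide
  by_cases h1 : c = 1
  · subst h1; decide
  by_cases h2 : c = 2
  · subst h2; decide
  rw [beq_eq_false_iff_ne.mpr (show (c : Int) ≠ 1 by omega),
    beq_eq_false_iff_ne.mpr (show (c : Int) ≠ 2 by omega),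
    beq_eq_false_iff_ne.mpr (show (c : Int) ≠ 0 by omega),
    decide_eq_true (show (2 : Int) < c by omega)]
  rfl

theorem mem_nbrsOf_canon {k : String} {c : Int × Int} (h : k ∈ nbrsOf c) :
    isCanonTile k = true := by
  simp only [nbrsOf, List.mem_cons, List.not_mem_nil, or_false] at h
  rcases h with rfl | rfl | rfl | rfl | rfl | rfl <;> exact isCanonTile_strCoord _

theorem runA_day_of {cur b : List String} {d : PySem.Dict String Int}
    (h : cur.foldlM (runA_tile cur) (cur, PySem.Dict.empty) = some (b, d)) :
    runA_day cur
      = some (d.items.foldl (fun b p => if p.2 == 2 then PySem.Set.add b p.1 else b) b) := by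
  rw [runA_day, h]

theorem runB_day_of {cur : List String} {c : PySem.Dict String Int}
    (h : runB_count cur = some c) :
    runB_day cur
      = some (cur.filter (fun t => c.getD t 0 == 1 || c.getD t 0 == 2)
          ++ (c.items.filter (fun p => p.2 == 2 && !(PySem.Set.contains cur p.1))).map (·.1)) := by
  rw [runB_day, h]

theorem day_eq (cur : List String) (hnd : cur.Nodup) (hc : ∀ t ∈ cur, isCanonTile t = true) :
    ∃ r, runA_day cur = some r ∧ runB_day cur = some r ∧ r.Nodup ∧ ∀ t ∈ r, isCanonTile t = true := by
  let S := seqOf cur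
  let w : String → Bool := fun s => !PySem.Set.contains cur s
  let p : String → Bool := fun t => ((cntA cur t == 0) || decide (2 < cntA cur t))
  let keepL := cur.filter (fun t => !p t)
  let W := S.filter w
  let bornL := (PySem.Set.ofList S).filter (fun k => ((List.count k S : Int) == 2) && w k)
  have hkeep_sub : ∀ t ∈ keepL, t ∈ cur := fun t ht => (List.mem_filter.mp ht).1
  have hborn_not_cur : ∀ k ∈ bornL, k ∉ cur := by
    intro k hk hkc
    have hwk : w k = true := by
      have h2 := (List.mem_filter.mp hk).2
      simp only [Bool.and_eq_true] at h2
      exact h2.2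
    simp only [w, Bool.not_eq_true', PySem.Set.contains] at hwk
    exact (by simpa [List.contains_iff_mem] using hwk : k ∉ cur) hkc
  -- A side
  have hbfin : cur.foldl (aRemove cur) cur = keepL :=
    remove_fold p cur [] (by simpa using hnd)
  have hW2 : cur.flatMap (fun t => (nbrsOf (coordOf t)).filter w) = W := by
    simp only [W, S, seqOf, List.filter_flatMap]
  have hfresh : ∀ k ∈ PySem.Set.ofList W, k ∉ keepL := by
    intro k hk hkeep
    have hkW : k ∈ W := (PySem.Set.mem_ofList W k).mp hk
    have hwk : w k = true := (List.mem_filter.mp hkW).2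
    simp only [w, Bool.not_eq_true', PySem.Set.contains] at hwk
    exact (by simpa [List.contains_iff_mem] using hwk : k ∉ cur) (hkeep_sub k hkeep)
  have hbornEq : (PySem.Set.ofList W).filter (fun k => ((List.count k W : Int)) == 2) = bornL := by
    show (PySem.Set.ofList (S.filter w)).filter (fun k => ((List.count k (S.filter w) : Int)) == 2)
        = bornL
    rw [ofList_filter, List.filter_filter]
    refine List.filter_congr (fun k hk => ?_)
    by_cases hwk : w k = true
    · rw [List.count_filter hwk]
    · have hwk' : w k = false := by simpa using hwk
      rw [hwk']
      simp
  have hAday : runA_day cur = some (keepL ++ bornL) := by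
    rw [runA_day_of (runA_fold_eq cur cur cur PySem.Dict.empty hc), hbfin, hW2,
      show W.foldl (fun d s => d.modify s 0 (· + 1)) PySem.Dict.empty = PySem.Dict.counter W
        from (PySem.Dict.counter_eq_foldl W).symm,
      PySem.Dict.items_counter, List.foldl_map,
      add_fold (fun k => ((List.count k W : Int) == 2)) (PySem.Set.ofList W) keepL
        (PySem.Set.nodup_ofList W) hfresh,
      hbornEq]
  -- B side
  have hkeepEq : cur.filter (fun t => ((PySem.Dict.counter S).getD t 0 == 1)
      || ((PySem.Dict.counter S).getD t 0 == 2)) = keepL := by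
    refine List.filter_congr (fun t htm => ?_)
    rw [PySem.Dict.getD_counter, seq_count cur hnd hc t htm]
    exact survive_bool _
  have hbornEq2 : ((PySem.Dict.counter S).items.filter
      (fun q => (q.2 == 2) && !(PySem.Set.contains cur q.1))).map (·.1) = bornL := by
    rw [PySem.Dict.items_counter, List.filter_map, List.map_map]
    rw [show ((fun (q : String × Int) => q.1) ∘ (fun k => (k, (List.count k S : Int)))) = id
      from rfl, List.map_id]
    exact List.filter_congr (fun k _ => rfl)
  have hBday : runB_day cur = some (keepL ++ bornL) := by
    rw [runB_day_of (runB_count_eq cur hc), hkeepEq, hbornEq2]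
  refine ⟨keepL ++ bornL, hAday, hBday, ?_, ?_⟩
  · refine List.Nodup.append (hnd.filter _) ((PySem.Set.nodup_ofList S).filter _) ?_
    intro a ha hb
    exact hborn_not_cur a hb (hkeep_sub a ha)
  · intro t htm
    rcases List.mem_append.mp htm with h | h
    · exact hc t (hkeep_sub t h)
    · have htS : t ∈ S := (PySem.Set.mem_ofList S t).mp (List.mem_filter.mp h).1
      obtain ⟨u, _, hu⟩ := List.mem_flatMap.mp htS
      exact mem_nbrsOf_canon hu

theorem loop_eq : ∀ (l : List Int) (cur : List String), cur.Nodup →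
    (∀ t ∈ cur, isCanonTile t = true) →
    l.foldl (fun acc _ => acc.bind runA_day) (some cur)
      = l.foldl (fun acc _ => acc.bind runB_day) (some cur) := by
  intro l
  induction l with
  | nil => intro cur _ _; rfl
  | cons a l ih =>
    intro cur hnd hc
    obtain ⟨r, hA, hB, hr1, hr2⟩ := day_eq cur hnd hc
    rw [List.foldl_cons, List.foldl_cons,
      show (some cur).bind runA_day = some r from by
        rw [show (some cur).bind runA_day = runA_day cur from rfl, hA],
      show (some cur).bind runB_day = some r from by
        rw [show (some cur).bind runB_day = runB_day cur from rfl, hB]]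
    exact ih r hr1 hr2

-- ===== VERDICT (by name: the statement is the Claim_ definition above) =====
theorem runArtExhibit_spec : Claim_equal_runArtExhibit := by
  intro blacks days _hdom hpre
  unfold Spec_runArtExhibit runArtExhibit runArtExhibit_alt
  obtain ⟨hnd, hcanon | hcanon⟩ := hpre
  · rw [PySem.Set.ofList_eq_self_of_nodup blacks hnd, PySem.List.pyRange_one_eq_nil hcanon]
    rfl
  · rw [PySem.Set.ofList_eq_self_of_nodup blacks hnd,
      loop_eq (PySem.List.pyRange 0 days 1) blacks hnd hcanon]
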